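-- pv_equiv track=rewrite | github.com/merce-fra/Dashing_Factory | dashing_factory_v01/scripts/myutils.py | initialize_col_with_dir
-- ===== SOURCE A (Python) =====
-- def initialize_col_with_dir (targets, directionz, functionz) :
--     output_col_list = []
--     for target in targets :
--         for direction in directionz :
--             for function in functionz :
--                 column = target+"_"+direction+"_"+function
--                 output_col_list.append(column)
--     return output_col_list
-- ===== SOURCE B (Python) =====
-- def initialize_col_with_dir(targets, directionz, functionz):
--     nd = len(directionz)
--     nf = len(functionz)
--     out = []
--     for k in range(len(targets) * nd * nf):
--         q, i_f = divmod(k, nf)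
--         i_t, i_d = divmod(q, nd)
--         out.append(targets[i_t] + "_" + directionz[i_d] + "_" + functionz[i_f])
--     return out
-- ===== Notes on version B (the rewrite author's own statement) =====
-- stated objective: alternative
-- what changed: Replaces the three nested loops with a single flat loop over one index k in range(len(targets)*nd*nf), recovering the three component indices arithmetically with divmod instead of by nesting.
import Mathlib
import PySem

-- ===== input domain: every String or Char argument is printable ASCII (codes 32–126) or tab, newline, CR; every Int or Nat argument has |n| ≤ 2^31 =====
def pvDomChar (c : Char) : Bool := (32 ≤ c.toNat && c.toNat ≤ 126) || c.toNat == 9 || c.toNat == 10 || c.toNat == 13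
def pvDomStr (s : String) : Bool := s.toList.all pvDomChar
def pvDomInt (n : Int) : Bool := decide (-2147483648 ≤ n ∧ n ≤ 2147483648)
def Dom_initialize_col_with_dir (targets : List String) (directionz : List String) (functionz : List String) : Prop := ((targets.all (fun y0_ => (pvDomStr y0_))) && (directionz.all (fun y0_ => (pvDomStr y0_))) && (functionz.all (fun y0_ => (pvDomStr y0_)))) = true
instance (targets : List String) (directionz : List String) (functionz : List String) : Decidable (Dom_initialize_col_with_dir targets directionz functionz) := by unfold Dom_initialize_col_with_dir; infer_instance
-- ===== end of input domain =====

-- B replaces the three nested loops by a single flat loop over one index k, recovering the three component indices arithmetically with divmod; same cost, different algorithmic decomposition.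

-- ===== PORT A =====
-- three nested for-loops appending "target_direction_function" to an accumulator
def initialize_col_with_dir (targets : List String) (directionz : List String) (functionz : List String) : List String :=
  targets.foldl (fun acc target =>
    directionz.foldl (fun acc direction =>
      functionz.foldl (fun acc function =>
        acc ++ [target ++ "_" ++ direction ++ "_" ++ function]) acc) acc) []

-- ===== PORT B =====
-- one loop: for k in range(len(targets)*nd*nf): q,i_f = divmod(k,nf); i_t,i_d = divmod(q,nd); append
-- divmod is ported as total floordiv/mod and xs[i] as pyGetD with default "": exact here, since on every
-- executed iteration nd,nf > 0 and all three indices are in range (the range is empty otherwise).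
def initialize_col_with_dir_alt (targets : List String) (directionz : List String) (functionz : List String) : List String :=
  let nd : Int := directionz.length
  let nf : Int := functionz.length
  (PySem.List.pyRange 0 ((targets.length : Int) * nd * nf) 1).foldl (fun out k =>
    let q := PySem.Int.floordiv k nf
    let i_f := PySem.Int.mod k nf
    let i_t := PySem.Int.floordiv q nd
    let i_d := PySem.Int.mod q nd
    out ++ [PySem.List.pyGetD targets i_t "" ++ "_" ++ PySem.List.pyGetD directionz i_d "" ++ "_" ++ PySem.List.pyGetD functionz i_f ""]) []

-- ===== PRECONDITION & SPEC =====
def Spec_initialize_col_with_dir (targets : List String) (directionz : List String) (functionz : List String) (out : List String) : Prop := out = initialize_col_with_dir_alt targets directionz functionz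
instance (targets : List String) (directionz : List String) (functionz : List String) (out : List String) : Decidable (Spec_initialize_col_with_dir targets directionz functionz out) := by unfold Spec_initialize_col_with_dir; infer_instance

-- ===== CLAIM (what is proved, stated in full; the proofs are below) =====
def Claim_equal_initialize_col_with_dir : Prop := ∀ (targets : List String) (directionz : List String) (functionz : List String), Dom_initialize_col_with_dir targets directionz functionz → Spec_initialize_col_with_dir targets directionz functionz (initialize_col_with_dir targets directionz functionz)

-- ===== LEMMAS AND PROOFS =====

theorem icwd_flatMap_congr {α β : Type} {l : List α} {f g : α → List β}
    (h : ∀ a ∈ l, f a = g a) : l.flatMap f = l.flatMap g := by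
  simp only [List.flatMap_def]; rw [List.map_congr_left h]

theorem icwd_flatMap_single {α β : Type} (l : List α) (f : α → β) :
    l.flatMap (fun x => [f x]) = l.map f := by
  induction l with
  | nil => rfl
  | cons x xs ih => simp [List.flatMap_cons, ih]

-- enumerating a product by a flat index: range (a*b) with (k / b, k % b) = nested ranges
theorem icwd_range_mul (a b : ℕ) {β : Type} (g : ℕ → ℕ → List β) :
    (List.range (a * b)).flatMap (fun k => g (k / b) (k % b))
      = (List.range a).flatMap (fun i => (List.range b).flatMap (g i)) := by
  induction a with
  | zero => simp
  | succ n ih =>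
    rw [Nat.succ_mul, List.range_add, List.flatMap_append, ih,
        List.range_succ, List.flatMap_append]
    have hstep : ((List.range b).map (fun i => n * b + i)).flatMap (fun k => g (k / b) (k % b))
        = (List.range b).flatMap (g n) := by
      simp only [List.flatMap_def, List.map_map, Function.comp_def]
      congr 1
      refine List.map_congr_left ?_
      intro j hj
      have hjb : j < b := List.mem_range.mp hj
      have hb : 0 < b := Nat.lt_of_le_of_lt (Nat.zero_le j) hjb
      have h1 : (n * b + j) / b = n := by
        rw [Nat.mul_comm n b, Nat.mul_add_div hb, Nat.div_eq_of_lt hjb, Nat.add_zero]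
      have h2 : (n * b + j) % b = j := by
        rw [Nat.mul_comm n b, Nat.mul_add_mod, Nat.mod_eq_of_lt hjb]
      rw [h1, h2]
    rw [hstep]
    simp

-- replacing iteration over a list by iteration over its index range
theorem icwd_flatMap_getD {α β : Type} (xs : List α) (dflt : α) (body : α → List β) :
    (List.range xs.length).flatMap (fun i => body (xs.getD i dflt)) = xs.flatMap body := by
  induction xs with
  | nil => rfl
  | cons x t ih =>
    rw [List.length_cons, List.range_succ_eq_map, List.flatMap_cons]
    simp only [List.flatMap_def, List.map_map, Function.comp_def, List.getD_cons_succ,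
      List.getD_cons_zero]
    rw [← List.flatMap_def, ← List.flatMap_def, ih, List.flatMap_cons]

theorem icwd_map_getD {α β : Type} (xs : List α) (dflt : α) (body : α → β) :
    (List.range xs.length).map (fun i => body (xs.getD i dflt)) = xs.map body := by
  induction xs with
  | nil => rfl
  | cons x t ih =>
    rw [List.length_cons, List.range_succ_eq_map, List.map_cons, List.map_map]
    simp only [Function.comp_def, List.getD_cons_succ, List.getD_cons_zero]
    rw [ih, List.map_cons]

-- A's port in flatMap form
theorem icwd_inner (directionz functionz : List String) (target : String) (acc : List String) :
    directionz.foldl (fun acc direction =>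
      functionz.foldl (fun acc function =>
        acc ++ [target ++ "_" ++ direction ++ "_" ++ function]) acc) acc
    = acc ++ directionz.flatMap (fun d =>
        functionz.map (fun f => target ++ "_" ++ d ++ "_" ++ f)) :=
  Eq.trans
    (PySem.List.foldl_congr_mem _ _ _ _
      (by intro acc d _; exact PySem.List.foldl_append_singleton_eq_map ..))
    (PySem.List.foldl_append_eq_flatMap ..)

theorem icwd_A (targets directionz functionz : List String) :
    initialize_col_with_dir targets directionz functionz
      = targets.flatMap (fun t => directionz.flatMap (fun d =>
          functionz.map (fun f => t ++ "_" ++ d ++ "_" ++ f))) := by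
  unfold initialize_col_with_dir
  refine Eq.trans (Eq.trans
      (PySem.List.foldl_congr_mem _ _ _ _ (by intro acc t _; exact icwd_inner ..))
      (PySem.List.foldl_append_eq_flatMap ..)) ?_
  simp

-- B's port as a map over the flat index range, indices already in ℕ form
theorem icwd_B (targets directionz functionz : List String) :
    initialize_col_with_dir_alt targets directionz functionz
      = (List.range (targets.length * directionz.length * functionz.length)).map
          (fun k => targets.getD (k / functionz.length / directionz.length) ""
            ++ "_" ++ directionz.getD (k / functionz.length % directionz.length) ""
            ++ "_" ++ functionz.getD (k % functionz.length) "") := by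
  have hN : ((targets.length : Int) * (directionz.length : Int) * (functionz.length : Int))
      = ((targets.length * directionz.length * functionz.length : ℕ) : Int) := by push_cast; ring
  simp only [initialize_col_with_dir_alt]
  rw [PySem.List.foldl_append_singleton_eq_map, PySem.List.pyRange_one,
      Int.sub_zero, hN, Int.toNat_natCast, List.map_map]
  refine List.map_congr_left ?_
  intro k _
  simp only [Function.comp_def, zero_add, PySem.Int.floordiv_natCast, PySem.Int.mod_natCast,
    PySem.List.pyGetD_natCast]

theorem icwd_eq (targets directionz functionz : List String) :
    initialize_col_with_dir targets directionz functionz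
      = initialize_col_with_dir_alt targets directionz functionz := by
  rw [icwd_A, icwd_B]
  conv_rhs =>
    rw [← icwd_flatMap_single
          (List.range (targets.length * directionz.length * functionz.length))
          (fun k => targets.getD (k / functionz.length / directionz.length) ""
            ++ "_" ++ directionz.getD (k / functionz.length % directionz.length) ""
            ++ "_" ++ functionz.getD (k % functionz.length) ""),
        icwd_range_mul (targets.length * directionz.length) functionz.length
          (fun q j => [targets.getD (q / directionz.length) "" ++ "_"
            ++ directionz.getD (q % directionz.length) "" ++ "_" ++ functionz.getD j ""]),
        icwd_range_mul targets.length directionz.length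
          (fun i m => (List.range functionz.length).flatMap (fun j =>
            [targets.getD i "" ++ "_" ++ directionz.getD m "" ++ "_" ++ functionz.getD j ""]))]
  conv_lhs =>
    rw [← icwd_flatMap_getD targets "" (fun t => directionz.flatMap (fun d =>
          functionz.map (fun f => t ++ "_" ++ d ++ "_" ++ f)))]
  refine icwd_flatMap_congr ?_
  intro i _
  conv_lhs =>
    rw [← icwd_flatMap_getD directionz "" (fun d =>
          functionz.map (fun f => targets.getD i "" ++ "_" ++ d ++ "_" ++ f))]
  refine icwd_flatMap_congr ?_
  intro m _
  rw [icwd_flatMap_single]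
  conv_lhs =>
    rw [← icwd_map_getD functionz "" (fun f =>
          targets.getD i "" ++ "_" ++ directionz.getD m "" ++ "_" ++ f)]

-- ===== VERDICT (by name: the statement is the Claim_ definition above) =====
theorem initialize_col_with_dir_spec : Claim_equal_initialize_col_with_dir := by
  intro t d f _
  unfold Spec_initialize_col_with_dir
  exact icwd_eq t d f
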